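-- pv_equiv track=rewrite | github.com/zeldaret/ss | tools/custom/rel_setup.py | build_class_name
-- ===== SOURCE A (Python) =====
-- import string
--
-- DEFAULT_NAME_FALLBACKS = [
--     ("d_a_b_", "dAcB"),
--     ("d_a_e_", "dAcEn"),
--     ("d_a_obj_", "dAcO"),
--     ("d_a_npc_", "dAcNpc"),
--     ("d_t_", "dTg"),
--     ("d_a_", "dAc"),
--     ("d_", "d"),
-- ]
--
-- def build_class_name(strings, file_name):
--     for s in strings:
--         if "::StateID_" in s:
--             return s.split("::")[0]
--
--     for s in strings:
--         if "::m_allocator" in s: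
--             return s.split("::")[0]
--
--     for base, cl in DEFAULT_NAME_FALLBACKS:
--         if file_name.startswith(base):
--             l = len(base)
--             return cl + string.capwords(file_name[l:], "_").replace("_", "") + "_c"
--
--     return None
-- ===== SOURCE B (Python) =====
-- import string
--
-- DEFAULT_NAME_FALLBACKS = [
--     ("d_a_b_", "dAcB"),
--     ("d_a_e_", "dAcEn"),
--     ("d_a_obj_", "dAcO"),
--     ("d_a_npc_", "dAcNpc"),
--     ("d_t_", "dTg"),
--     ("d_a_", "dAc"),
--     ("d_", "d"),
-- ]
--
-- def build_class_name(strings, file_name):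
--     candidate = None
--     for s in strings:
--         if "::StateID_" in s:
--             return s.split("::")[0]
--         if candidate is None and "::m_allocator" in s:
--             candidate = s.split("::")[0]
--     if candidate is not None:
--         return candidate
--     return next(
--         (cl + string.capwords(file_name[len(base):], "_").replace("_", "") + "_c"
--          for base, cl in DEFAULT_NAME_FALLBACKS
--          if file_name.startswith(base)),
--         None,
--     )
-- ===== Notes on version B (the rewrite author's own statement) =====
-- stated objective: simpler
-- what changed: Replaces A's two sequential scans over strings with a single pass that returns early on the first '::StateID_' hit and remembers the first '::m_allocator' prefix in a candidate variable, and replaces the explicit fallback loop with a next() over a generator (find-first).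
import Mathlib
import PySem

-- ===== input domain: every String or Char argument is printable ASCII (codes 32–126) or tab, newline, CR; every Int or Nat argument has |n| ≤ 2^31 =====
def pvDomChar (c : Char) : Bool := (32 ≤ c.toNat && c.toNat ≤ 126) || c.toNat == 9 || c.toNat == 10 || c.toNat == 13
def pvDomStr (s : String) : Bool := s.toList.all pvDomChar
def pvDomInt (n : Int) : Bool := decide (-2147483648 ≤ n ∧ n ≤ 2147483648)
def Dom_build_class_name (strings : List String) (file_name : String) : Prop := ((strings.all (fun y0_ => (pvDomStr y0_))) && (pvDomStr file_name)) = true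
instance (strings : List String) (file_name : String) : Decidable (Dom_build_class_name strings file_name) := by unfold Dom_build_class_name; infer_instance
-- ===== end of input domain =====

-- B merges A's two scans over `strings` into one early-returning pass with a saved
-- first-'::m_allocator' candidate, and turns the fallback loop into a find-first (next over a generator).

def DEFAULT_NAME_FALLBACKS : List (String × String) :=
  [("d_a_b_", "dAcB"), ("d_a_e_", "dAcEn"), ("d_a_obj_", "dAcO"), ("d_a_npc_", "dAcNpc"),
   ("d_t_", "dTg"), ("d_a_", "dAc"), ("d_", "d")]

-- shared string helpers (both Pythons contain these exact expressions)
-- s.split("::")[0]; Python split never returns an empty list, so [0] is the head (headD's default is unreachable)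
def pvSplitHead (s : String) : String :=
  String.ofList ((PySem.Chars.splitOn s.toList "::".toList).headD [])

-- str.capitalize(): first char upper-cased, rest lower-cased (exact on the ASCII domain)
def pvCapitalize (cs : List Char) : List Char :=
  match cs with
  | [] => []
  | c :: rest => PySem.Chars.upperChar c :: PySem.Chars.lower rest

-- string.capwords(s, "_") = "_".join(w.capitalize() for w in s.split("_"))
def pvCapwordsU (cs : List Char) : List Char :=
  PySem.Chars.join "_".toList ((PySem.Chars.splitOn cs "_".toList).map pvCapitalize)

-- cl + string.capwords(file_name[len(base):], "_").replace("_", "") + "_c"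
def pvFallbackValue (base cl file_name : String) : String :=
  String.ofList (cl.toList ++
    PySem.Chars.replace (pvCapwordsU (file_name.toList.drop base.toList.length)) "_".toList [] ++
    "_c".toList)

-- ===== PORT A =====
def loopA_state : List String → Option String
  | [] => none
  | s :: rest => if PySem.Str.isIn "::StateID_" s then some (pvSplitHead s) else loopA_state rest

def loopA_alloc : List String → Option String
  | [] => none
  | s :: rest => if PySem.Str.isIn "::m_allocator" s then some (pvSplitHead s) else loopA_alloc rest

def loopA_fb : List (String × String) → String → Option String
  | [], _ => none
  | (base, cl) :: rest, fn =>
    if PySem.Str.startswith fn base then some (pvFallbackValue base cl fn) else loopA_fb rest fn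

def build_class_name (strings : List String) (file_name : String) : Option String :=
  match loopA_state strings with
  | some r => some r
  | none =>
    match loopA_alloc strings with
    | some r => some r
    | none => loopA_fb DEFAULT_NAME_FALLBACKS file_name

-- ===== PORT B =====
-- single pass: early return on '::StateID_', first '::m_allocator' head kept as candidate
def loopB : List String → Option String → Option String
  | [], cand => cand
  | s :: rest, cand =>
    if PySem.Str.isIn "::StateID_" s then some (pvSplitHead s)
    else if cand.isNone && PySem.Str.isIn "::m_allocator" s then loopB rest (some (pvSplitHead s))
    else loopB rest cand

def build_class_name_alt (strings : List String) (file_name : String) : Option String :=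
  match loopB strings none with
  | some r => some r
  | none =>
    (DEFAULT_NAME_FALLBACKS.find? (fun p => PySem.Str.startswith file_name p.1)).map
      (fun p => pvFallbackValue p.1 p.2 file_name)

-- ===== PRECONDITION & SPEC =====
def Spec_build_class_name (strings : List String) (file_name : String) (out : Option String) : Prop := out = build_class_name_alt strings file_name
instance (strings : List String) (file_name : String) (out : Option String) : Decidable (Spec_build_class_name strings file_name out) := by unfold Spec_build_class_name; infer_instance

-- ===== CLAIM (what is proved, stated in full; the proofs are below) =====
def Claim_equal_build_class_name : Prop := ∀ (strings : List String) (file_name : String), Dom_build_class_name strings file_name → Spec_build_class_name strings file_name (build_class_name strings file_name)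

-- ===== LEMMAS AND PROOFS =====

theorem loopB_eq (strings : List String) (cand : Option String) :
    loopB strings cand = ((loopA_state strings).or (cand.or (loopA_alloc strings))) := by
  induction strings generalizing cand with
  | nil => cases cand <;> simp [loopB, loopA_state, loopA_alloc]
  | cons s rest ih =>
    cases h1 : PySem.Str.isIn "::StateID_" s with
    | true => simp only [loopB, loopA_state, h1, if_true, Option.some_or]
    | false =>
      cases cand with
      | some c =>
        simp only [loopB, loopA_state, loopA_alloc, h1, Bool.false_eq_true, if_false,
          Option.isNone_some, Bool.false_and, ih, Option.some_or, Option.or_some]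
      | none =>
        cases h2 : PySem.Str.isIn "::m_allocator" s with
        | true =>
          simp only [loopB, loopA_state, loopA_alloc, h1, h2, Bool.false_eq_true, if_false,
            Option.isNone_none, Bool.true_and, if_true, ih, Option.none_or, Option.some_or]
        | false =>
          simp only [loopB, loopA_state, loopA_alloc, h1, h2, Bool.false_eq_true, if_false,
            Option.isNone_none, Bool.true_and, ih, Option.none_or]

theorem loopA_fb_eq (l : List (String × String)) (fn : String) :
    loopA_fb l fn = (l.find? (fun p => PySem.Str.startswith fn p.1)).map
      (fun p => pvFallbackValue p.1 p.2 fn) := by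
  induction l with
  | nil => rfl
  | cons p rest ih =>
    obtain ⟨base, cl⟩ := p
    cases h : PySem.Str.startswith fn base with
    | true => simp only [loopA_fb, List.find?, h, if_true, Option.map_some]
    | false => simp only [loopA_fb, List.find?, h, Bool.false_eq_true, if_false, ih]

-- ===== VERDICT (by name: the statement is the Claim_ definition above) =====
theorem build_class_name_spec : Claim_equal_build_class_name := by
  intro strings file_name _
  unfold Spec_build_class_name build_class_name build_class_name_alt
  rw [loopB_eq, loopA_fb_eq]
  cases hs : loopA_state strings <;> cases ha : loopA_alloc strings <;> simp
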